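-- pv_equiv track=rewrite | github.com/pauliacomi/pyGAPS | src/adsutils/utilities/matplotlib_chemformula.py | convert_chemformula
-- ===== SOURCE A (Python) =====
-- def convert_chemformula(string):
--     "converts a string to a matplotlib parsable chemical formula"
--
--     inner = []
--     # Iterate through the string, adding non-numbers to the no_digits list
--     number_processing = False
--     for i in string:
--         if i.isdigit() and number_processing:
--             number_processing = True
--         elif i.isdigit() and not number_processing:
--             inner.append('_{')
--             number_processing = True
--         else:
--             if number_processing:
--                 inner.append('}')
--                 number_processing = False
--         inner.append(i)
--
--     if inner[-1].isdigit():
--         inner.append('}')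
--     # Now join all elements of the list with '',
--     # which puts all of the characters together.
--     result = "$"
--     result += ''.join(inner)
--     result += "$"
--
--     return result
-- ===== SOURCE B (Python) =====
-- def convert_chemformula(string):
--     "converts a string to a matplotlib parsable chemical formula"
--     parts = []
--     i = 0
--     n = len(string)
--     while i < n:
--         j = i
--         d = string[i].isdigit()
--         while j < n and string[j].isdigit() == d:
--             j += 1
--         run = string[i:j]
--         parts.append('_{' + run + '}' if d else run)
--         i = j
--     return '$' + ''.join(parts) + '$'
-- ===== Notes on version B (the rewrite author's own statement) =====
-- stated objective: simpler
-- what changed: B splits the string into maximal digit/non-digit runs with a two-pointer scan and wraps each digit run in subscript markup as one unit, replacing A's per-character state machine with its trailing-brace fixup; Pre_ excludes only the empty string, on which A raises IndexError at inner[-1].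
import Mathlib
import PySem

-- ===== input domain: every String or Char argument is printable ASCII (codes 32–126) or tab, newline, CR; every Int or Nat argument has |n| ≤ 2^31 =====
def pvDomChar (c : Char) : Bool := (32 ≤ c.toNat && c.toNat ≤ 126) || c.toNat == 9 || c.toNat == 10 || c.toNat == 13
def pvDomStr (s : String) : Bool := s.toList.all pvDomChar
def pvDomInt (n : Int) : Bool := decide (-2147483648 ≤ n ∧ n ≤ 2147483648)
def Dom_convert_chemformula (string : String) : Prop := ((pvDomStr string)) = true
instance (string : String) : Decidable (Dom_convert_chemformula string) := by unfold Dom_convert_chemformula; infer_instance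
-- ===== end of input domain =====

-- B replaces A's per-character digit state machine (with trailing-brace fixup) by a
-- run-based two-pointer scan that wraps each maximal digit run in subscript markup as one unit.

-- ===== PORT A =====
-- state: (inner as a list of string pieces, number_processing)
def chemStepA (s : List (List Char) × Bool) (c : Char) : List (List Char) × Bool :=
  if PySem.Chars.isdigit c && s.2 then (s.1 ++ [[c]], true)
  else if PySem.Chars.isdigit c && !s.2 then (s.1 ++ [['_', '{'], [c]], true)
  else if s.2 then (s.1 ++ [['}'], [c]], false)
  else (s.1 ++ [[c]], false)

def convert_chemformula (string : String) : String :=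
  let st := string.toList.foldl chemStepA ([], false)
  match PySem.List.pyGet? st.1 (-1) with
  | none => ""   -- inner[-1] raises IndexError here (empty string); excluded by Pre_
  | some last =>
      let inner := if PySem.Chars.strIsdigit last then st.1 ++ [['}']] else st.1
      String.mk ('$' :: inner.flatten ++ ['$'])

-- ===== PORT B =====
-- the inner while loop (advance j over the run) is List.takeWhile/dropWhile on the suffix
def chemRuns (cs : List Char) : List (List Char) :=
  match h : cs with
  | [] => []
  | c :: t =>
      let d := PySem.Chars.isdigit c
      let run := cs.takeWhile (fun x => PySem.Chars.isdigit x == d)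
      let rest := cs.dropWhile (fun x => PySem.Chars.isdigit x == d)
      (if d then '_' :: '{' :: run ++ ['}'] else run) :: chemRuns rest
termination_by cs.length
decreasing_by
  simp only [h, List.dropWhile_cons, beq_self_eq_true, if_pos]
  exact Nat.lt_succ_of_le (List.length_dropWhile_le _ t)

def convert_chemformula_alt (string : String) : String :=
  String.mk ('$' :: (chemRuns string.toList).flatten ++ ['$'])

-- ===== PRECONDITION & SPEC =====
-- Pre_ excludes only the empty string, on which A raises IndexError at inner[-1].
def Pre_convert_chemformula (string : String) : Prop := string ≠ ""
instance (string : String) : Decidable (Pre_convert_chemformula string) := by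
  unfold Pre_convert_chemformula; infer_instance
def pvWitness_convert_chemformula : String := "CH4"

def Spec_convert_chemformula (string : String) (out : String) : Prop :=
  out = convert_chemformula_alt string
instance (string : String) (out : String) : Decidable (Spec_convert_chemformula string out) := by
  unfold Spec_convert_chemformula; infer_instance

-- ===== CLAIM (what is proved, stated in full; the proofs are below) =====
def Claim_equal_convert_chemformula : Prop := ∀ (string : String), Dom_convert_chemformula string → Pre_convert_chemformula string → Spec_convert_chemformula string (convert_chemformula string)

-- ===== LEMMAS AND PROOFS =====

-- common specification: process cs with number_processing flag np, closing brace included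
def chemSpec : List Char → Bool → List Char
  | [], np => if np then ['}'] else []
  | c :: cs, np =>
      if PySem.Chars.isdigit c then (if np then [] else ['_', '{']) ++ c :: chemSpec cs true
      else (if np then ['}'] else []) ++ c :: chemSpec cs false

theorem pyGet?_neg_one_two {α : Type} (xs : List α) (a b : α) :
    PySem.List.pyGet? (xs ++ [a, b]) (-1) = some b := by
  rw [show xs ++ [a, b] = (xs ++ [a]) ++ [b] by simp]
  exact PySem.List.pyGet?_neg_one_append_singleton ..

theorem chemA_last (cs : List Char) (c : Char) (inner : List (List Char)) (np : Bool) :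
    PySem.List.pyGet? ((cs ++ [c]).foldl chemStepA (inner, np)).1 (-1) = some [c] ∧
    ((cs ++ [c]).foldl chemStepA (inner, np)).2 = PySem.Chars.isdigit c := by
  rw [List.foldl_append]
  set st := cs.foldl chemStepA (inner, np)
  simp only [List.foldl_cons, List.foldl_nil, chemStepA]
  cases h : PySem.Chars.isdigit c <;> cases h2 : st.2 <;>
    simp [pyGet?_neg_one_two, PySem.List.pyGet?_neg_one_append_singleton]

theorem chemA_flatten (cs : List Char) (inner : List (List Char)) (np : Bool) :
    ((cs.foldl chemStepA (inner, np)).1).flatten ++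
      (if (cs.foldl chemStepA (inner, np)).2 then ['}'] else []) =
    inner.flatten ++ chemSpec cs np := by
  induction cs generalizing inner np with
  | nil => cases np <;> simp [chemSpec]
  | cons c cs ih =>
      simp only [List.foldl_cons]
      cases h : PySem.Chars.isdigit c <;> cases np <;>
        simp [chemStepA, h, ih, chemSpec]

theorem chemSpec_nondigit (t rest : List Char) (h : ∀ c ∈ t, PySem.Chars.isdigit c = false) :
    chemSpec (t ++ rest) false = t ++ chemSpec rest false := by
  induction t with
  | nil => rfl
  | cons c t ih =>
      have hc := h c (List.mem_cons_self ..)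
      simp [chemSpec, hc, ih (fun x hx => h x (List.mem_cons_of_mem _ hx))]

theorem chemSpec_digit (t rest : List Char) (h : ∀ c ∈ t, PySem.Chars.isdigit c = true) :
    chemSpec (t ++ rest) true = t ++ chemSpec rest true := by
  induction t with
  | nil => rfl
  | cons c t ih =>
      have hc := h c (List.mem_cons_self ..)
      simp [chemSpec, hc, ih (fun x hx => h x (List.mem_cons_of_mem _ hx))]

theorem chemSpec_close (rest : List Char)
    (h : rest = [] ∨ ∃ c t, rest = c :: t ∧ PySem.Chars.isdigit c = false) :
    chemSpec rest true = '}' :: chemSpec rest false := by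
  rcases h with h | ⟨c, t, rfl, hc⟩
  · simp [h, chemSpec]
  · simp [chemSpec, hc]

theorem chemSpec_cons_digit (c : Char) (cs : List Char) (h : PySem.Chars.isdigit c = true) :
    chemSpec (c :: cs) false = '_' :: '{' :: c :: chemSpec cs true := by
  simp [chemSpec, h]

theorem chemRuns_flatten (cs : List Char) :
    (chemRuns cs).flatten = chemSpec cs false := by
  induction hn : cs.length using Nat.strong_induction_on generalizing cs with
  | _ n ih =>
  match cs with
  | [] => simp [chemRuns, chemSpec]
  | c :: t =>
      rw [chemRuns]
      have hpc : (PySem.Chars.isdigit c == PySem.Chars.isdigit c) = true := by simp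
      have hrun : ∀ x ∈ (c :: t).takeWhile (fun x => PySem.Chars.isdigit x == PySem.Chars.isdigit c),
          PySem.Chars.isdigit x = PySem.Chars.isdigit c := by
        intro x hx
        have hpx := List.mem_takeWhile_imp hx
        simpa using hpx
      have hdrop : (c :: t).dropWhile (fun x => PySem.Chars.isdigit x == PySem.Chars.isdigit c) =
          t.dropWhile (fun x => PySem.Chars.isdigit x == PySem.Chars.isdigit c) := by
        simp
      have hlen : ((c :: t).dropWhile (fun x => PySem.Chars.isdigit x == PySem.Chars.isdigit c)).length < n := by
        rw [hdrop, ← hn]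
        exact Nat.lt_succ_of_le (List.length_dropWhile_le _ t)
      have hih := ih _ hlen _ rfl
      have hrest : (c :: t).dropWhile (fun x => PySem.Chars.isdigit x == PySem.Chars.isdigit c) = [] ∨
          ∃ c' t', (c :: t).dropWhile (fun x => PySem.Chars.isdigit x == PySem.Chars.isdigit c) = c' :: t' ∧
            PySem.Chars.isdigit c' = (!PySem.Chars.isdigit c) := by
        cases hr : (c :: t).dropWhile (fun x => PySem.Chars.isdigit x == PySem.Chars.isdigit c) with
        | nil => exact Or.inl rfl
        | cons c' t' =>
            refine Or.inr ⟨c', t', rfl, ?_⟩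
            have hhd := List.head?_dropWhile_not (fun x => PySem.Chars.isdigit x == PySem.Chars.isdigit c) (c :: t)
            rw [hr] at hhd
            simp only [List.head?_cons] at hhd
            cases hdig : PySem.Chars.isdigit c' <;> cases hdc : PySem.Chars.isdigit c <;>
              simp [hdig, hdc] at hhd ⊢
      have hsplit : (c :: t).takeWhile (fun x => PySem.Chars.isdigit x == PySem.Chars.isdigit c) ++
          (c :: t).dropWhile (fun x => PySem.Chars.isdigit x == PySem.Chars.isdigit c) = c :: t :=
        List.takeWhile_append_dropWhile
      rcases Bool.eq_false_or_eq_true (PySem.Chars.isdigit c) with hdv | hdv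
      · rw [if_pos hdv]
        rw [List.flatten_cons, hih]
        have htk : (c :: t).takeWhile (fun x => PySem.Chars.isdigit x == PySem.Chars.isdigit c) =
          c :: t.takeWhile (fun x => PySem.Chars.isdigit x == PySem.Chars.isdigit c) := by
          simp
        have hclose : chemSpec ((c :: t).dropWhile (fun x => PySem.Chars.isdigit x == PySem.Chars.isdigit c)) true =
          '}' :: chemSpec ((c :: t).dropWhile (fun x => PySem.Chars.isdigit x == PySem.Chars.isdigit c)) false := by
          apply chemSpec_close
          rcases hrest with h | ⟨c', t', hr, hc'⟩
          · exact Or.inl h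
          · exact Or.inr ⟨c', t', hr, by simp [hc', hdv]⟩
        conv_rhs => rw [← hsplit, htk, List.cons_append]
        have htdig : ∀ x ∈ t.takeWhile (fun x => PySem.Chars.isdigit x == PySem.Chars.isdigit c),
          PySem.Chars.isdigit x = true := by
          intro x hx
          have hx' : x ∈ (c :: t).takeWhile (fun x => PySem.Chars.isdigit x == PySem.Chars.isdigit c) := by
            rw [htk]; exact List.mem_cons_of_mem _ hx
          rw [hrun x hx', hdv]
        rw [chemSpec_cons_digit c _ hdv, chemSpec_digit _ _ htdig, hclose, htk]
        simp

      · rw [if_neg (by rw [hdv]; exact Bool.false_ne_true)]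
        rw [List.flatten_cons, hih]
        conv_rhs => rw [← hsplit]
        rw [chemSpec_nondigit _ _ (fun x hx => by rw [hrun x hx, hdv])]

theorem convert_chemformula_eq (string : String) (h : string ≠ "") :
    convert_chemformula string = convert_chemformula_alt string := by
  have hl : string.toList ≠ [] := fun hc => h (String.toList_eq_nil_iff.mp hc)
  rcases List.eq_nil_or_concat string.toList with hnil | ⟨cs, c, hcc⟩
  · exact absurd hnil hl
  · rw [List.concat_eq_append] at hcc
    obtain ⟨h1, h2⟩ := chemA_last cs c [] false
    simp only [convert_chemformula, convert_chemformula_alt, hcc, h1]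
    rw [chemRuns_flatten]
    have hstr : PySem.Chars.strIsdigit [c] = PySem.Chars.isdigit c := by
      simp [PySem.Chars.strIsdigit]
    have hfl := chemA_flatten (cs ++ [c]) [] false
    rw [h2] at hfl
    rw [hstr]
    cases hdig : PySem.Chars.isdigit c <;> rw [hdig] at hfl <;>
      simp_all [List.flatten_append]

-- ===== VERDICT (by name: the statement is the Claim_ definition above) =====
theorem convert_chemformula_spec : Claim_equal_convert_chemformula := by
  intro s _ hpre
  unfold Spec_convert_chemformula
  exact convert_chemformula_eq s hpre
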